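-- pv_equiv track=rewrite | github.com/phanit1/CP | Major Scales/Solution.py | solve
-- ===== SOURCE A (Python) =====
-- def solve(lines):
--     line = lines
--     notes = ['C', 'C#', 'D', 'D#', 'E', 'F', 'F#', 'G', 'G#', 'A', 'A#', 'B']
--     majors = []
--     tones = [2, 2, 1, 2, 2, 2, 1]
--     for i in notes:
--         row = []
--         p = notes.index(i)
--         for j in tones:
--             row.append(notes[p])
--             p += j
--             p %= len(notes)
--         majors.append(row)
--
--     results = []
--     for i in majors:
--         flag = True
--         for j in line:
--             if j not in i:
--                 flag = False
--                 break
--         if flag: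
--             results.append(i[0])
--
--     return ' '.join(results)
-- ===== SOURCE B (Python) =====
-- def solve(lines):
--     notes = ['C', 'C#', 'D', 'D#', 'E', 'F', 'F#', 'G', 'G#', 'A', 'A#', 'B']
--     steps = [0, 2, 4, 5, 7, 9, 11]
--     # inverted index: note -> set of tonics whose major scale contains that note
--     index = {}
--     for t, tonic in enumerate(notes):
--         for s in steps:
--             index.setdefault(notes[(t + s) % 12], set()).add(tonic)
--     surviving = set(notes)
--     for j in lines:
--         surviving = surviving & index.get(j, set())
--     return ' '.join(t for t in notes if t in surviving)
-- ===== Notes on version B (the rewrite author's own statement) =====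
-- stated objective: alternative
-- what changed: Replaces A's per-scale membership scan over the query notes with an inverted index (note -> set of tonics whose scale contains it) built once, intersected over the query notes, emitting surviving tonics in chromatic order.
import Mathlib
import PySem

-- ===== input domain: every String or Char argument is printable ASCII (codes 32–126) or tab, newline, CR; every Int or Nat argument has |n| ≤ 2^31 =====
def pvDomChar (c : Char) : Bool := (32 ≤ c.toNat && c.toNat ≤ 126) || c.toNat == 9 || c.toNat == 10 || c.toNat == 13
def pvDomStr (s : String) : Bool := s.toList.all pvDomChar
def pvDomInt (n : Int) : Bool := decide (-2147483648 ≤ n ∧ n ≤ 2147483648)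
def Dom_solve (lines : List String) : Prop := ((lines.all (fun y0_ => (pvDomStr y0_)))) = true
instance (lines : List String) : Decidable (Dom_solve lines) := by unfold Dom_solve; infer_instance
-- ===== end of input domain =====

-- B replaces A's scale-by-scale membership scan with an inverted index (note -> tonic set) intersected over the query notes (objective: alternative).

-- ===== PORT A =====
-- inner loop over `line` with break: returns False at the first j not in row
def flagA (row : List String) : List String → Bool
  | [] => true
  | j :: rest => if row.contains j then flagA row rest else false

def solve (lines : List String) : String :=
  let notes : List String := ["C", "C#", "D", "D#", "E", "F", "F#", "G", "G#", "A", "A#", "B"]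
  let tones : List Int := [2, 2, 1, 2, 2, 2, 1]
  let majors : List (List String) :=
    notes.foldl (fun majors i =>
      -- notes.index i : always found, so .getD 0 is never the fallback
      let p : Int := (PySem.List.index? notes i).getD 0
      let st := tones.foldl (fun (st : List String × Int) j =>
        -- notes[p] with 0 ≤ p < 12 always, so pyGetD's default is never used
        (st.1 ++ [PySem.List.pyGetD notes st.2 ""], PySem.Int.mod (st.2 + j) (notes.length : Int)))
        (([] : List String), p)
      majors ++ [st.1]) []
  let results : List String :=
    majors.foldl (fun res i =>
      if flagA i lines then res ++ [PySem.List.pyGetD i 0 ""] else res) []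
  PySem.Str.join " " results

-- ===== PORT B =====
def solve_alt (lines : List String) : String :=
  let notes : List String := ["C", "C#", "D", "D#", "E", "F", "F#", "G", "G#", "A", "A#", "B"]
  let steps : List Int := [0, 2, 4, 5, 7, 9, 11]
  -- index.setdefault(note, set()).add(tonic) ported as Dict.modify (exact: same resulting dict)
  let index : PySem.Dict String (PySem.Set String) :=
    (PySem.List.enumerate notes).foldl (fun d ti =>
      steps.foldl (fun d s =>
        d.modify (PySem.List.pyGetD notes (PySem.Int.mod (ti.1 + s) 12) "") PySem.Set.empty
          (fun st => PySem.Set.add st ti.2)) d) PySem.Dict.empty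
  let surviving : PySem.Set String :=
    lines.foldl (fun sv j => PySem.Set.inter sv (index.getD j PySem.Set.empty))
      (PySem.Set.ofList notes)
  PySem.Str.join " " (notes.filter (fun t => PySem.Set.contains surviving t))

-- ===== PRECONDITION & SPEC =====
def Spec_solve (lines : List String) (out : String) : Prop := out = solve_alt lines
instance (lines : List String) (out : String) : Decidable (Spec_solve lines out) := by unfold Spec_solve; infer_instance

-- ===== CLAIM (what is proved, stated in full; the proofs are below) =====
def Claim_equal_solve : Prop := ∀ (lines : List String), Dom_solve lines → Spec_solve lines (solve lines)

-- ===== LEMMAS AND PROOFS =====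

-- the twelve (tonic, major-scale) pairs, as the closed folds in the ports compute them
def pvPairs : List (String × List String) :=
  [("C", ["C", "D", "E", "F", "G", "A", "B"]),
   ("C#", ["C#", "D#", "F", "F#", "G#", "A#", "C"]),
   ("D", ["D", "E", "F#", "G", "A", "B", "C#"]),
   ("D#", ["D#", "F", "G", "G#", "A#", "C", "D"]),
   ("E", ["E", "F#", "G#", "A", "B", "C#", "D#"]),
   ("F", ["F", "G", "A", "A#", "C", "D", "E"]),
   ("F#", ["F#", "G#", "A#", "B", "C#", "D#", "F"]),
   ("G", ["G", "A", "B", "C", "D", "E", "F#"]),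
   ("G#", ["G#", "A#", "C", "C#", "D#", "F", "G"]),
   ("A", ["A", "B", "C#", "D", "E", "F#", "G#"]),
   ("A#", ["A#", "C", "D", "D#", "F", "G", "A"]),
   ("B", ["B", "C#", "D#", "E", "F#", "G#", "A#"])]

def pvNotes : List String := ["C", "C#", "D", "D#", "E", "F", "F#", "G", "G#", "A", "A#", "B"]

-- B's inverted index, evaluated to a literal
def pvIndex : PySem.Dict String (PySem.Set String) :=
  (PySem.List.enumerate pvNotes).foldl (fun d ti =>
    ([0, 2, 4, 5, 7, 9, 11] : List Int).foldl (fun d s =>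
      d.modify (PySem.List.pyGetD pvNotes (PySem.Int.mod (ti.1 + s) 12) "") PySem.Set.empty
        (fun st => PySem.Set.add st ti.2)) d) PySem.Dict.empty

lemma flagA_eq_all (row ls : List String) : flagA row ls = ls.all (fun j => row.contains j) := by
  induction ls with
  | nil => rfl
  | cons j r ih =>
    simp only [flagA, List.all_cons, ih]
    cases h : row.contains j <;> simp [h]

lemma contains_inter (s t : PySem.Set String) (x : String) :
    PySem.Set.contains (PySem.Set.inter s t) x = (PySem.Set.contains s x && PySem.Set.contains t x) := by
  rw [Bool.eq_iff_iff]
  simp [PySem.Set.contains_iff, PySem.Set.mem_inter, Bool.and_eq_true]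

lemma contains_foldl_inter (d : PySem.Dict String (PySem.Set String)) (t : String)
    (ls : List String) (acc : PySem.Set String) :
    PySem.Set.contains (ls.foldl (fun sv j => PySem.Set.inter sv (d.getD j PySem.Set.empty)) acc) t
      = (PySem.Set.contains acc t && ls.all (fun j => PySem.Set.contains (d.getD j PySem.Set.empty) t)) := by
  induction ls generalizing acc with
  | nil => simp
  | cons j r ih =>
    simp only [List.foldl_cons, List.all_cons, ih, contains_inter, Bool.and_assoc]

-- key fact: t's scale contains j  iff  t is in the inverted index's set for j
-- the same index as a literal (insertion order of B's fold)
def pvIndexLit : PySem.Dict String (PySem.Set String) := PySem.Dict.mk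
  [("C", ["C", "C#", "D#", "F", "G", "G#", "A#"]),
   ("D", ["C", "D", "D#", "F", "G", "A", "A#"]),
   ("E", ["C", "D", "E", "F", "G", "A", "B"]),
   ("F", ["C", "C#", "D#", "F", "F#", "G#", "A#"]),
   ("G", ["C", "D", "D#", "F", "G", "G#", "A#"]),
   ("A", ["C", "D", "E", "F", "G", "A", "A#"]),
   ("B", ["C", "D", "E", "F#", "G", "A", "B"]),
   ("C#", ["C#", "D", "E", "F#", "G#", "A", "B"]),
   ("D#", ["C#", "D#", "E", "F#", "G#", "A#", "B"]),
   ("F#", ["C#", "D", "E", "F#", "G", "A", "B"]),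
   ("G#", ["C#", "D#", "E", "F#", "G#", "A", "B"]),
   ("A#", ["C#", "D#", "F", "F#", "G#", "A#", "B"])]

set_option maxRecDepth 8192 in
lemma pvIndex_eq : pvIndex = pvIndexLit := by decide

set_option maxRecDepth 8192 in
lemma pointwise : ∀ tr ∈ pvPairs, ∀ j : String,
    tr.2.contains j = PySem.Set.contains (pvIndex.getD j PySem.Set.empty) tr.1 := by
  intro tr htr j
  by_cases h1 : j = "C"; · subst h1; fin_cases htr <;> decide
  by_cases h2 : j = "C#"; · subst h2; fin_cases htr <;> decide
  by_cases h3 : j = "D"; · subst h3; fin_cases htr <;> decide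
  by_cases h4 : j = "D#"; · subst h4; fin_cases htr <;> decide
  by_cases h5 : j = "E"; · subst h5; fin_cases htr <;> decide
  by_cases h6 : j = "F"; · subst h6; fin_cases htr <;> decide
  by_cases h7 : j = "F#"; · subst h7; fin_cases htr <;> decide
  by_cases h8 : j = "G"; · subst h8; fin_cases htr <;> decide
  by_cases h9 : j = "G#"; · subst h9; fin_cases htr <;> decide
  by_cases h10 : j = "A"; · subst h10; fin_cases htr <;> decide
  by_cases h11 : j = "A#"; · subst h11; fin_cases htr <;> decide
  by_cases h12 : j = "B"; · subst h12; fin_cases htr <;> decide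
  rw [pvIndex_eq] at *
  fin_cases htr <;>
    simp [pvIndexLit, PySem.Dict.getD, PySem.Dict.get?,
      h1, h2, h3, h4, h5, h6, h7, h8, h9, h10, h11, h12,
      Ne.symm h1, Ne.symm h2, Ne.symm h3, Ne.symm h4, Ne.symm h5, Ne.symm h6,
      Ne.symm h7, Ne.symm h8, Ne.symm h9, Ne.symm h10, Ne.symm h11, Ne.symm h12]

lemma filter_map_fst {α β : Type} (ps : List (α × β)) (pA : α × β → Bool) (q : α → Bool)
    (h : ∀ tr ∈ ps, pA tr = q tr.1) :
    (ps.filter pA).map (fun tr => tr.1) = (ps.map (fun tr => tr.1)).filter q := by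
  induction ps with
  | nil => rfl
  | cons tr rest ih =>
    have htr := h tr (List.mem_cons_self)
    simp only [List.filter_cons, List.map_cons, htr]
    cases q tr.1 <;>
      simp [ih (fun x hx => h x (List.mem_cons_of_mem _ hx))]

-- ===== VERDICT (by name: the statement is the Claim_ definition above) =====
theorem solve_spec : Claim_equal_solve := by
  intro lines _
  unfold Spec_solve
  have hA : solve lines = PySem.Str.join " "
      (pvPairs.foldl (fun res tr => if flagA tr.2 lines then res ++ [tr.1] else res) []) := rfl
  have hB : solve_alt lines = PySem.Str.join " "
      (pvNotes.filter (fun t => PySem.Set.contains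
        (lines.foldl (fun sv j => PySem.Set.inter sv (pvIndex.getD j PySem.Set.empty))
          (PySem.Set.ofList pvNotes)) t)) := rfl
  rw [hA, hB]
  simp only [PySem.List.foldl_append_if, List.nil_append]
  apply congrArg (PySem.Str.join " ")
  have h : ∀ tr ∈ pvPairs, flagA tr.2 lines =
      (fun t => PySem.Set.contains
        (lines.foldl (fun sv j => PySem.Set.inter sv (pvIndex.getD j PySem.Set.empty))
          (PySem.Set.ofList pvNotes)) t) tr.1 := by
    intro tr htr
    simp only
    rw [flagA_eq_all, contains_foldl_inter]
    have hmem : PySem.Set.contains (PySem.Set.ofList pvNotes) tr.1 = true := by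
      fin_cases htr <;> decide
    rw [hmem, Bool.true_and]
    exact congrArg lines.all (funext (pointwise tr htr))
  exact filter_map_fst pvPairs _ _ h
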